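-- pv_equiv track=rewrite | github.com/Zhang20000807/DLCoG | se2iden/build_mutitask_dataset.py | generate_line_pairs
-- ===== SOURCE A (Python) =====
-- def generate_line_pairs(code_snippet):
--     lines = code_snippet.splitlines()
--     pairs = []
--
--     for i in range(1, len(lines)):
--         previous_lines = "\n".join(lines[:i])
--         current_line = lines[i]
--
--         pairs.append((previous_lines, current_line))
--     return pairs
-- ===== SOURCE B (Python) =====
-- def generate_line_pairs(code_snippet):
--     lines = code_snippet.splitlines()
--     pairs = []
--     if lines:
--         acc = lines[0]
--         for line in lines[1:]:
--             pairs.append((acc, line))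
--             acc = acc + "\n" + line
--     return pairs
-- ===== Notes on version B (the rewrite author's own statement) =====
-- stated objective: alternative
-- what changed: Instead of re-joining lines[:i] from scratch on every iteration, B threads a running prefix string through a single loop over the tail, appending (accumulator, line) and then extending the accumulator with a newline plus the line.
import Mathlib
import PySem

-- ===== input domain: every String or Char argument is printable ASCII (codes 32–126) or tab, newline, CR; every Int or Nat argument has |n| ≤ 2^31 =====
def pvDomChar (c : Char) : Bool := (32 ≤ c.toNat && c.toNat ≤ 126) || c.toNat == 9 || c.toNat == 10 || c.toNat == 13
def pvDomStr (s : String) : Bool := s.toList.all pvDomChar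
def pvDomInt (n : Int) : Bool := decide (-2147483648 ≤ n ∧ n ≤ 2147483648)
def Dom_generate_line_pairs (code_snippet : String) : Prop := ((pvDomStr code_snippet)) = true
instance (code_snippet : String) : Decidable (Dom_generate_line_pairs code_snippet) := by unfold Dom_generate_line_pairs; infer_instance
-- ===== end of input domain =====

-- B threads a running prefix accumulator through one pass instead of re-joining lines[:i] each step (alternative decomposition).

-- ===== PORT A =====
def generate_line_pairs (code_snippet : String) : List (String × String) :=
  let lines := PySem.Str.splitlines code_snippet
  (PySem.List.pyRange 1 (lines.length : Int)).foldl
    (fun pairs i =>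
      let previous_lines := PySem.Str.join "\n" (PySem.List.slice lines none (some i))
      let current_line := PySem.List.pyGetD lines i ""   -- index i ∈ range(1, len) is always in bounds
      pairs ++ [(previous_lines, current_line)])
    []

-- ===== PORT B =====
def pvAltGo (acc : String) : List String → List (String × String)
  | [] => []
  | line :: rest => (acc, line) :: pvAltGo (PySem.Str.join "" [acc, "\n", line]) rest

def generate_line_pairs_alt (code_snippet : String) : List (String × String) :=
  match PySem.Str.splitlines code_snippet with
  | [] => []
  | l0 :: rest => pvAltGo l0 rest

-- ===== PRECONDITION & SPEC =====
def Spec_generate_line_pairs (code_snippet : String) (out : List (String × String)) : Prop := out = generate_line_pairs_alt code_snippet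
instance (code_snippet : String) (out : List (String × String)) : Decidable (Spec_generate_line_pairs code_snippet out) := by unfold Spec_generate_line_pairs; infer_instance

-- ===== CLAIM (what is proved, stated in full; the proofs are below) =====
def Claim_equal_generate_line_pairs : Prop := ∀ (code_snippet : String), Dom_generate_line_pairs code_snippet → Spec_generate_line_pairs code_snippet (generate_line_pairs code_snippet)

-- ===== LEMMAS AND PROOFS =====

-- sep-join of a list extended on the right, for a nonempty list (on the Chars side)
lemma pv_intercalate_append_singleton (sep a : List Char) (l : List (List Char)) (h : l ≠ []) :
    List.intercalate sep (l ++ [a]) = List.intercalate sep l ++ sep ++ a := by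
  induction l with
  | nil => simp at h
  | cons x xs ih =>
    cases xs with
    | nil => simp [List.intercalate, List.intersperse]
    | cons y ys =>
      simp only [List.cons_append, List.intercalate, List.intersperse, List.flatten] at *
      simp_all

-- accumulator step: ('\n'.join(pre)) + '\n' + a = '\n'.join(pre ++ [a])
lemma pv_join_step (pre : List String) (a : String) (h : pre ≠ []) :
    PySem.Str.join "" [PySem.Str.join "\n" pre, "\n", a] = PySem.Str.join "\n" (pre ++ [a]) := by
  apply String.toList_inj.mp
  simp only [PySem.Str.toList_join, List.map_cons, List.map_nil, List.map_append,
    PySem.Str.toList_join, PySem.Chars.join]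
  rw [pv_intercalate_append_singleton _ _ _ (by simpa using h)]
  simp [List.intercalate, List.intersperse]

-- B's loop invariant: pvAltGo over the tail equals A's indexed map over the full list
lemma pv_altGo_eq (rest : List String) : ∀ (pre : List String), pre ≠ [] →
    pvAltGo (PySem.Str.join "\n" pre) rest =
      (PySem.List.pyRange (pre.length : Int) ((pre.length + rest.length : Nat) : Int)).map
        (fun i => (PySem.Str.join "\n" (PySem.List.slice (pre ++ rest) none (some i)),
                   PySem.List.pyGetD (pre ++ rest) i "")) := by
  induction rest with
  | nil =>
    intro pre h
    simp [pvAltGo, PySem.List.pyRange]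
  | cons l rs ih =>
    intro pre h
    have hlt : (pre.length : Int) < ((pre.length + (l :: rs).length : Nat) : Int) := by
      push_cast; simp
    rw [PySem.List.pyRange_one_cons hlt, List.map_cons]
    have hhead₁ : PySem.List.slice (pre ++ l :: rs) none (some (pre.length : Int)) = pre := by
      rw [PySem.List.slice_to _ (Int.natCast_nonneg _)]
      simp [List.take_left']
    have hhead₂ : PySem.List.pyGetD (pre ++ l :: rs) (pre.length : Int) "" = l := by
      rw [PySem.List.pyGetD_natCast]
      simp [List.getD]
    show (PySem.Str.join "\n" pre, l) :: pvAltGo (PySem.Str.join "" [PySem.Str.join "\n" pre, "\n", l]) rs = _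
    rw [pv_join_step pre l h, hhead₁, hhead₂]
    congr 1
    have H := ih (pre ++ [l]) (by simp)
    simp only [List.append_assoc, List.singleton_append, List.length_append,
      List.length_cons] at H ⊢
    rw [show pre.length + (rs.length + 1) = pre.length + 1 + rs.length from by omega]
    rw [show (pre.length : Int) + 1 = ((pre.length + 1 : Nat) : Int) from by push_cast; ring]
    exact H

lemma pv_ports_eq (s : String) : generate_line_pairs s = generate_line_pairs_alt s := by
  unfold generate_line_pairs generate_line_pairs_alt
  cases hls : PySem.Str.splitlines s with
  | nil => simp [PySem.List.pyRange]
  | cons l0 rest =>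
    simp only []
    rw [PySem.List.foldl_append_singleton_eq_map, List.nil_append]
    have h1 : PySem.Str.join "\n" [l0] = l0 := by
      apply String.toList_inj.mp
      simp [PySem.Str.toList_join, PySem.Chars.join, List.intercalate]
    have := pv_altGo_eq rest [l0] (by simp)
    rw [h1] at this
    rw [this]
    simp only [List.singleton_append, List.length_cons, List.length_nil]
    rw [show 0 + 1 + rest.length = rest.length + 1 from by omega, show 0 + 1 = 1 from rfl]
    norm_num

-- ===== VERDICT (by name: the statement is the Claim_ definition above) =====
theorem generate_line_pairs_spec : Claim_equal_generate_line_pairs := by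
  intro s _
  unfold Spec_generate_line_pairs
  exact pv_ports_eq s
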